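-- pv_equiv track=rewrite | github.com/MrBrantCode/unitest_baseline | mut_generate/mist_train_taco/taco_5009/solution.py | determine_winner_photo
-- ===== SOURCE A (Python) =====
-- def determine_winner_photo(n, likes):
--     mydic = {}
--     max_likes = 0
--     winner_id = 0
--
--     for i in range(n):
--         photo_id = likes[i]
--         mydic[photo_id] = mydic.get(photo_id, 0) + 1
--
--         if mydic[photo_id] > max_likes:
--             max_likes = mydic[photo_id]
--             winner_id = photo_id
--         elif mydic[photo_id] == max_likes and photo_id < winner_id:
--             winner_id = photo_id
--
--     return winner_id
-- ===== SOURCE B (Python) =====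
-- def determine_winner_photo(n, likes):
--     counts = {}
--     for i in range(n):
--         counts[likes[i]] = counts.get(likes[i], 0) + 1
--     if not counts:
--         return 0
--     m = max(counts.values())
--     return min(pid for pid, c in counts.items() if c == m)
-- ===== Notes on version B (the rewrite author's own statement) =====
-- stated objective: simpler
-- what changed: A's single streaming pass with a running (max_likes, winner_id) leader updated inside the counting loop is replaced by a build-then-select decomposition: first build the full count table, then take m = max of the counts and return the smallest id whose count equals m.
import Mathlib
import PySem

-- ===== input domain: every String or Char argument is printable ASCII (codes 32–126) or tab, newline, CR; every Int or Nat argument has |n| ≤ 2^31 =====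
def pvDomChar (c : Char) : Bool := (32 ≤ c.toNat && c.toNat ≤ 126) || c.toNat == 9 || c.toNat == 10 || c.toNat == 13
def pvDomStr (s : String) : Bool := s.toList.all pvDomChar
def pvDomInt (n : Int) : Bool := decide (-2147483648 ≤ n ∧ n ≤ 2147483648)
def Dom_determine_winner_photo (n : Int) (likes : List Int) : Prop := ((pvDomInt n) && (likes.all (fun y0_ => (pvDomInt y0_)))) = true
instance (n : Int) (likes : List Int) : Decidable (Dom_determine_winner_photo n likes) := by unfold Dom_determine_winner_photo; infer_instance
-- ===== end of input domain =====

-- B replaces A's streaming dict + running-leader loop by a build-prefix-then-two-scan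
-- decomposition (max count, then min id attaining it); objective: simpler, not faster.

-- ===== PORT A =====
-- A's loop state: (mydic, max_likes, winner_id); one step of the for-loop over range(n)
def pvStepA (likes : List Int) (st : PySem.Dict Int Int × Int × Int) (i : Int) :
    PySem.Dict Int Int × Int × Int :=
  let photo_id := PySem.List.pyGetD likes i 0   -- likes[i]; in range under Pre_
  let c := st.1.getD photo_id 0 + 1             -- mydic.get(photo_id, 0) + 1
  let d := st.1.insert photo_id c               -- mydic[photo_id] = c
  if c > st.2.1 then (d, c, photo_id)
  else if c = st.2.1 ∧ photo_id < st.2.2 then (d, st.2.1, photo_id)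
  else (d, st.2.1, st.2.2)

def determine_winner_photo (n : Int) (likes : List Int) : Int :=
  ((PySem.List.pyRange 0 n 1).foldl (pvStepA likes)
    ((PySem.Dict.empty : PySem.Dict Int Int), (0 : Int), (0 : Int))).2.2

-- ===== PORT B =====
def determine_winner_photo_alt (n : Int) (likes : List Int) : Int :=
  let counts := (PySem.List.pyRange 0 n 1).foldl
    (fun d i =>
      let pid := PySem.List.pyGetD likes i 0   -- likes[i]; in range under Pre_
      d.insert pid (d.getD pid 0 + 1))
    (PySem.Dict.empty : PySem.Dict Int Int)
  if counts.items = [] then 0                   -- 'if not counts'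
  else
    let m := (PySem.List.max? counts.values (fun y => y)).getD 0
    (PySem.List.min?
        ((counts.items.filter (fun kv => kv.2 = m)).map (fun kv => kv.1))
        (fun y => y)).getD 0   -- generator nonempty here, so the default is never used

-- ===== PRECONDITION & SPEC =====
-- A raises IndexError exactly when n > len(likes) (likes[i] out of range); excluded.
def Pre_determine_winner_photo (n : Int) (likes : List Int) : Prop :=
  n ≤ (likes.length : Int)
instance (n : Int) (likes : List Int) : Decidable (Pre_determine_winner_photo n likes) := by
  unfold Pre_determine_winner_photo; infer_instance

def pvWitness_determine_winner_photo : Int × List Int := (4, [2, 1, 2, 1])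

def Spec_determine_winner_photo (n : Int) (likes : List Int) (out : Int) : Prop :=
  out = determine_winner_photo_alt n likes
instance (n : Int) (likes : List Int) (out : Int) :
    Decidable (Spec_determine_winner_photo n likes out) := by
  unfold Spec_determine_winner_photo; infer_instance

-- ===== CLAIM (what is proved, stated in full; the proofs are below) =====
def Claim_equal_determine_winner_photo : Prop :=
  ∀ (n : Int) (likes : List Int), Dom_determine_winner_photo n likes →
    Pre_determine_winner_photo n likes →
    Spec_determine_winner_photo n likes (determine_winner_photo n likes)

-- ===== LEMMAS AND PROOFS =====

-- spec-side abbreviations: final count, max count, winner (exactly B's expressions)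
def pvCnt (p : List Int) (x : Int) : Int := (List.count x p : Int)

def pvM (p : List Int) : Int :=
  (PySem.List.max? (PySem.Dict.counter p).values (fun y => y)).getD 0

def pvW (p : List Int) : Int :=
  (PySem.List.min?
      (((PySem.Dict.counter p).items.filter (fun kv => kv.2 = pvM p)).map (fun kv => kv.1))
      (fun y => y)).getD 0

lemma pvCnt_snoc (p : List Int) (a x : Int) :
    pvCnt (p ++ [a]) x = pvCnt p x + (if x = a then 1 else 0) := by
  by_cases h : x = a
  · subst h; simp [pvCnt, List.count_append]
  · simp [pvCnt, List.count_append, List.count_singleton, h]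
    omega

lemma pvOfList_ne_nil {p : List Int} (hp : p ≠ []) : PySem.Set.ofList p ≠ [] := by
  cases p with
  | nil => exact absurd rfl hp
  | cons a t =>
    intro h
    have := (PySem.Set.mem_ofList (a :: t) a).mpr (by simp)
    rw [h] at this; simp at this

lemma pvValues_counter (p : List Int) :
    (PySem.Dict.counter p).values = (PySem.Set.ofList p).map (fun k => pvCnt p k) := by
  simp [PySem.Dict.values, PySem.Dict.items_counter, Function.comp, pvCnt]

lemma pvCand_mem (p : List Int) (y : Int) :
    y ∈ ((PySem.Dict.counter p).items.filter (fun kv => kv.2 = pvM p)).map (fun kv => kv.1) ↔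
      y ∈ p ∧ pvCnt p y = pvM p := by
  simp [PySem.Dict.items_counter, List.mem_filter, PySem.Set.mem_ofList, pvCnt]

-- pvM is an upper bound on counts
lemma pvM_isMax (p : List Int) : ∀ x ∈ p, pvCnt p x ≤ pvM p := by
  intro x hx
  rcases h : PySem.List.max? (PySem.Dict.counter p).values (fun y => y) with _ | m
  · rw [PySem.List.max?_eq_none_iff, pvValues_counter] at h
    simp at h
    exact absurd ((PySem.Set.mem_ofList p x).mpr hx) (by rw [h]; simp)
  · have hb := PySem.List.max?_isMax h (pvCnt p x) (by
      rw [pvValues_counter]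
      exact List.mem_map.mpr ⟨x, (PySem.Set.mem_ofList p x).mpr hx, rfl⟩)
    rw [pvM, h, Option.getD_some]
    exact hb

-- pvM is attained when p ≠ []
lemma pvM_attained {p : List Int} (hp : p ≠ []) : ∃ x ∈ p, pvCnt p x = pvM p := by
  rcases h : PySem.List.max? (PySem.Dict.counter p).values (fun y => y) with _ | m
  · rw [PySem.List.max?_eq_none_iff, pvValues_counter] at h
    simp at h
    exact absurd h (pvOfList_ne_nil hp)
  · have hm := PySem.List.max?_mem h
    rw [pvValues_counter] at hm
    obtain ⟨x, hx, hxc⟩ := List.mem_map.mp hm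
    exact ⟨x, (PySem.Set.mem_ofList p x).mp hx, by rw [hxc, pvM, h]; rfl⟩

lemma pvM_eq_of {p : List Int} {v : Int} (hp : p ≠ [])
    (hub : ∀ x ∈ p, pvCnt p x ≤ v) (hex : ∃ x ∈ p, pvCnt p x = v) : pvM p = v := by
  obtain ⟨x, hx, hxv⟩ := hex
  obtain ⟨y, hy, hyv⟩ := pvM_attained hp
  have h1 := pvM_isMax p x hx
  have h2 := hub y hy
  omega

-- pvW: member of the candidate set, has max count, minimal among candidates
lemma pvW_spec {p : List Int} (hp : p ≠ []) :
    pvW p ∈ p ∧ pvCnt p (pvW p) = pvM p ∧ ∀ x ∈ p, pvCnt p x = pvM p → pvW p ≤ x := by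
  obtain ⟨x0, hx0, hx0v⟩ := pvM_attained hp
  have hmem := (pvCand_mem p x0).mpr ⟨hx0, hx0v⟩
  rcases h : PySem.List.min?
      (((PySem.Dict.counter p).items.filter (fun kv => kv.2 = pvM p)).map (fun kv => kv.1))
      (fun y => y) with _ | w
  · rw [PySem.List.min?_eq_none_iff] at h
    rw [h] at hmem; simp at hmem
  · have hw := (pvCand_mem p w).mp (PySem.List.min?_mem h)
    have hwv : pvW p = w := by rw [pvW, h]; rfl
    refine ⟨hwv ▸ hw.1, by rw [hwv]; exact hw.2, ?_⟩
    intro x hx hxv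
    have := PySem.List.min?_isMin h x ((pvCand_mem p x).mpr ⟨hx, hxv⟩)
    rw [hwv]; exact this

lemma pvW_eq_of {p : List Int} {v : Int} (hp : p ≠ [])
    (hmem : v ∈ p) (hcnt : pvCnt p v = pvM p)
    (hmin : ∀ x ∈ p, pvCnt p x = pvM p → v ≤ x) : pvW p = v := by
  obtain ⟨h1, h2, h3⟩ := pvW_spec hp
  have ha := h3 v hmem hcnt
  have hb := hmin (pvW p) h1 h2
  omega

lemma pvM_nil : pvM [] = 0 := by decide
lemma pvW_nil : pvW [] = 0 := by decide

-- the counter dict A builds (first component of its loop state)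
def pvCntDict (p : List Int) : PySem.Dict Int Int :=
  p.foldl (fun d x => d.insert x (d.getD x 0 + 1)) PySem.Dict.empty

lemma pvCntDict_getD (p : List Int) (x : Int) : (pvCntDict p).getD x 0 = pvCnt p x := by
  rw [pvCntDict, PySem.Dict.getD_foldl_insert_add_one]
  simp [pvCnt, PySem.Dict.getD, PySem.Dict.get?, PySem.Dict.empty]

-- snoc laws for (pvM, pvW), matching A's three branches
lemma pvMem_snoc {p : List Int} {a x : Int} (hx : x ∈ p ++ [a]) (hxa : x ≠ a) : x ∈ p := by
  rcases List.mem_append.mp hx with h | h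
  · exact h
  · simp at h; exact absurd h hxa

lemma pvCnt_snoc_ub {p : List Int} {a v : Int}
    (hub : ∀ y ∈ p, pvCnt p y ≤ v) (ha : pvCnt p a + 1 ≤ v) :
    ∀ x ∈ p ++ [a], pvCnt (p ++ [a]) x ≤ v := by
  intro x hx
  rw [pvCnt_snoc]
  by_cases hxa : x = a
  · subst hxa; rw [if_pos rfl]; omega
  · have := hub x (pvMem_snoc hx hxa)
    simp only [if_neg hxa]; omega

lemma pvMW_snoc_gt {p : List Int} {a : Int} (h : pvM p < pvCnt p a + 1) :
    pvM (p ++ [a]) = pvCnt p a + 1 ∧ pvW (p ++ [a]) = a := by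
  have hq : p ++ [a] ≠ [] := by simp
  have hca : pvCnt (p ++ [a]) a = pvCnt p a + 1 := by rw [pvCnt_snoc]; simp
  have hother : ∀ x, x ≠ a → pvCnt (p ++ [a]) x = pvCnt p x := by
    intro x hx; rw [pvCnt_snoc]; simp [hx]
  have hM : pvM (p ++ [a]) = pvCnt p a + 1 := by
    apply pvM_eq_of hq
    · exact pvCnt_snoc_ub (fun y hy => by have := pvM_isMax p y hy; omega) (le_refl _)
    · exact ⟨a, by simp, hca⟩
  refine ⟨hM, ?_⟩
  apply pvW_eq_of hq (by simp) (by rw [hca, hM])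
  intro x hx hxv
  by_cases hxa : x = a
  · omega
  · exfalso
    rw [hother x hxa, hM] at hxv
    have := pvM_isMax p x (pvMem_snoc hx hxa); omega

lemma pvMW_snoc_eq {p : List Int} {a : Int} (h : pvCnt p a + 1 = pvM p) :
    pvM (p ++ [a]) = pvM p ∧ pvW (p ++ [a]) = min (pvW p) a := by
  have hq : p ++ [a] ≠ [] := by simp
  have hp : p ≠ [] := by
    rintro rfl; rw [pvM_nil] at h; simp [pvCnt] at h
  have hca : pvCnt (p ++ [a]) a = pvM p := by rw [pvCnt_snoc]; simp [h]
  have hother : ∀ x, x ≠ a → pvCnt (p ++ [a]) x = pvCnt p x := by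
    intro x hx; rw [pvCnt_snoc]; simp [hx]
  obtain ⟨hWmem, hWcnt, hWmin⟩ := pvW_spec hp
  have hWa : pvW p ≠ a := by intro he; rw [he] at hWcnt; omega
  have hM : pvM (p ++ [a]) = pvM p := by
    apply pvM_eq_of hq
    · exact pvCnt_snoc_ub (pvM_isMax p) (by omega)
    · exact ⟨a, by simp, hca⟩
  refine ⟨hM, ?_⟩
  rcases le_total (pvW p) a with hle | hle
  · rw [min_eq_left hle]
    apply pvW_eq_of hq (List.mem_append.mpr (Or.inl hWmem))
      (by rw [hother _ hWa, hM, hWcnt])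
    intro x hx hxv
    by_cases hxa : x = a
    · subst hxa; exact hle
    · rw [hother x hxa, hM] at hxv
      exact hWmin x (pvMem_snoc hx hxa) hxv
  · rw [min_eq_right hle]
    apply pvW_eq_of hq (by simp) (by rw [hca, hM])
    intro x hx hxv
    by_cases hxa : x = a
    · omega
    · rw [hother x hxa, hM] at hxv
      exact le_trans hle (hWmin x (pvMem_snoc hx hxa) hxv)

lemma pvMW_snoc_lt {p : List Int} {a : Int} (h : pvCnt p a + 1 < pvM p) :
    pvM (p ++ [a]) = pvM p ∧ pvW (p ++ [a]) = pvW p := by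
  have hq : p ++ [a] ≠ [] := by simp
  have hp : p ≠ [] := by
    rintro rfl; rw [pvM_nil] at h; simp [pvCnt] at h
  have hother : ∀ x, x ≠ a → pvCnt (p ++ [a]) x = pvCnt p x := by
    intro x hx; rw [pvCnt_snoc]; simp [hx]
  obtain ⟨hWmem, hWcnt, hWmin⟩ := pvW_spec hp
  have hWa : pvW p ≠ a := by intro he; rw [he] at hWcnt; omega
  obtain ⟨x0, hx0, hx0v⟩ := pvM_attained hp
  have hx0a : x0 ≠ a := by intro he; rw [he] at hx0v; omega
  have hM : pvM (p ++ [a]) = pvM p := by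
    apply pvM_eq_of hq
    · exact pvCnt_snoc_ub (pvM_isMax p) (by omega)
    · exact ⟨x0, List.mem_append.mpr (Or.inl hx0), by rw [hother _ hx0a]; exact hx0v⟩
  refine ⟨hM, ?_⟩
  apply pvW_eq_of hq (List.mem_append.mpr (Or.inl hWmem))
    (by rw [hother _ hWa, hM, hWcnt])
  intro x hx hxv
  by_cases hxa : x = a
  · subst hxa
    have hca : pvCnt (p ++ [x]) x = pvCnt p x + 1 := by rw [pvCnt_snoc]; simp
    omega
  · rw [hother x hxa, hM] at hxv
    exact hWmin x (pvMem_snoc hx hxa) hxv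

-- A's loop over the pid list p computes (counter p, pvM p, pvW p)
def pvStep' (st : PySem.Dict Int Int × Int × Int) (a : Int) :
    PySem.Dict Int Int × Int × Int :=
  let c := st.1.getD a 0 + 1
  let d := st.1.insert a c
  if c > st.2.1 then (d, c, a)
  else if c = st.2.1 ∧ a < st.2.2 then (d, st.2.1, a)
  else (d, st.2.1, st.2.2)

lemma pvLoopA_spec (p : List Int) :
    p.foldl pvStep' ((PySem.Dict.empty : PySem.Dict Int Int), (0 : Int), (0 : Int)) =
      (pvCntDict p, pvM p, pvW p) := by
  induction p using List.reverseRecOn with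
  | nil => simp [pvCntDict, pvM_nil, pvW_nil]
  | append_singleton p a ih =>
    rw [List.foldl_append, ih]
    have hc : (pvCntDict p).getD a 0 = pvCnt p a := pvCntDict_getD p a
    have hcd : (pvCntDict p).insert a (pvCnt p a + 1) = pvCntDict (p ++ [a]) := by
      rw [← hc]; simp [pvCntDict, List.foldl_append]
    simp only [List.foldl_cons, List.foldl_nil, pvStep', hc, hcd]
    rcases lt_trichotomy (pvM p) (pvCnt p a + 1) with hgt | heq | hlt
    · obtain ⟨hM, hW⟩ := pvMW_snoc_gt hgt
      rw [if_pos (by omega), hM, hW]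
    · obtain ⟨hM, hW⟩ := pvMW_snoc_eq heq.symm
      rw [if_neg (by omega)]
      by_cases hlt2 : a < pvW p
      · rw [if_pos ⟨heq.symm, hlt2⟩, hM, hW, min_eq_right (by omega)]
      · rw [if_neg (by tauto), hM, hW, min_eq_left (by omega)]
    · obtain ⟨hM, hW⟩ := pvMW_snoc_lt hlt
      rw [if_neg (by omega), if_neg (by omega), hM, hW]

-- the prefix both programs read: [likes[i] for i in range(n)] = likes.take n.toNat
lemma pvPref_eq (n : Int) (likes : List Int) (h : n ≤ (likes.length : Int)) :
    (PySem.List.pyRange 0 n 1).map (fun i => PySem.List.pyGetD likes i 0) =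
      likes.take n.toNat := by
  rcases le_or_gt n 0 with hn | hn
  · rw [PySem.List.pyRange_one_eq_nil hn]
    have : n.toNat = 0 := by omega
    simp [this]
  · have hlen : ((likes.take n.toNat).length : Int) = n := by
      simp [List.length_take]; omega
    have h2 := PySem.List.map_pyGetD_pyRange' (xs := likes.take n.toNat) (a := 0) (d := 0)
      (le_refl 0)
    rw [hlen] at h2
    simp only [Int.toNat_zero, List.drop_zero] at h2
    rw [← h2]
    apply List.map_congr_left
    intro i hi
    rw [PySem.List.mem_pyRange_one] at hi
    rw [PySem.List.pyGetD_eq_getElem _ _ hi.1 (by omega),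
        PySem.List.pyGetD_eq_getElem _ _ hi.1 (by rw [hlen]; omega)]
    rw [List.getElem_take]

-- ===== VERDICT (by name: the statement is the Claim_ definition above) =====
theorem determine_winner_photo_spec : Claim_equal_determine_winner_photo := by
  intro n likes _ hpre
  unfold Spec_determine_winner_photo determine_winner_photo determine_winner_photo_alt
  have hpref := pvPref_eq n likes hpre
  have hA : (PySem.List.pyRange 0 n 1).foldl (pvStepA likes)
      ((PySem.Dict.empty : PySem.Dict Int Int), (0 : Int), (0 : Int)) =
      ((PySem.List.pyRange 0 n 1).map (fun i => PySem.List.pyGetD likes i 0)).foldl pvStep'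
      ((PySem.Dict.empty : PySem.Dict Int Int), (0 : Int), (0 : Int)) := by
    rw [List.foldl_map]; rfl
  have hB : (PySem.List.pyRange 0 n 1).foldl
      (fun d i => d.insert (PySem.List.pyGetD likes i 0)
        (d.getD (PySem.List.pyGetD likes i 0) 0 + 1))
      (PySem.Dict.empty : PySem.Dict Int Int) =
      PySem.Dict.counter (likes.take n.toNat) := by
    have hm := List.foldl_map (f := fun i => PySem.List.pyGetD likes i 0)
      (g := fun (d : PySem.Dict Int Int) pid => d.insert pid (d.getD pid 0 + 1))
      (l := PySem.List.pyRange 0 n 1) (init := (PySem.Dict.empty : PySem.Dict Int Int))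
    rw [← hm, hpref]
    exact PySem.Dict.foldl_insert_getD_add_one_eq_counter _
  simp only []
  rw [hA, hpref, pvLoopA_spec, hB]
  by_cases hp : likes.take n.toNat = []
  · rw [hp, if_pos (show (PySem.Dict.counter ([] : List Int)).items = [] from rfl)]
    exact pvW_nil
  · have hitems : (PySem.Dict.counter (likes.take n.toNat)).items ≠ [] := by
      rw [PySem.Dict.items_counter]
      simp
      exact pvOfList_ne_nil hp
    rw [if_neg hitems]
    rfl
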